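-- pv_equiv track=rewrite | github.com/csmontt/hackerrank_exercises | maximum_diff_array.py | maxDiff4
-- ===== SOURCE A (Python) =====
-- def reverseElms(a):
--     revList = []
--     for i in range(len(a)):
--         revList.append(a[(len(a)-1)-i])
--     return revList
--
-- def maxDiff4(a):
--     a = reverseElms(a)
--     vmin = a[0]
--     dmax = 0
--     for i in range(len(a)):
--         if (a[i] < vmin):
--             vmin = a[i]
--         elif (a[i] - vmin > dmax):
--             dmax = a[i] - vmin
--     if dmax == 0:
--         return -1
--     else:
--         return dmax
-- ===== SOURCE B (Python) =====
-- def maxDiff4(a):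
--     # One forward pass builds a prefix-maximum table (pm[i] = max of the
--     # elements strictly before position i+1); a second pass scans it against
--     # the tail of the list.  No reversed copy of the list is built.
--     run = a[0]
--     pm = []
--     for x in a[1:]:
--         pm.append(run)
--         if x > run:
--             run = x
--     best = 0
--     for p, x in zip(pm, a[1:]):
--         if p - x > best:
--             best = p - x
--     return -1 if best == 0 else best
-- ===== Notes on version B (the rewrite author's own statement) =====
-- stated objective: simpler
-- what changed: B replaces A's build-a-reversed-copy + running-minimum scan by two forward passes over the original list: one builds a prefix-maximum table, the second takes the best prefixMax - element difference.
import Mathlib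
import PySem

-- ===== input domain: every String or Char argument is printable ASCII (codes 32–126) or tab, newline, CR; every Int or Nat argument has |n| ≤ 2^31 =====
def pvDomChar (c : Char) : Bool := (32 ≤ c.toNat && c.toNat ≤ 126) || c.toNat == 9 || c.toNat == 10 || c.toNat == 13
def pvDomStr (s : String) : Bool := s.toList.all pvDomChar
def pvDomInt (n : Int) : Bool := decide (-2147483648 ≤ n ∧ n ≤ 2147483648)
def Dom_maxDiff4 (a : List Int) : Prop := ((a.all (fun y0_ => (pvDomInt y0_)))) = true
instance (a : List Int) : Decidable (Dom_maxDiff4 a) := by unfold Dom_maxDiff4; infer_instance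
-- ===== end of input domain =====

-- B replaces A's reversed-copy + running-minimum scan by two forward passes
-- (prefix-maximum table, then best difference); return values proved equal on
-- every nonempty list (both raise IndexError on []).


-- ===== PORT A =====
def reverseElms (a : List Int) : List Int :=
  (PySem.List.pyRange 0 (PySem.List.len a)).foldl
    (fun revList i => revList ++ [PySem.List.pyGetD a (PySem.List.len a - 1 - i) 0]) []
    -- index (len a - 1 - i) is always in range for i in range(len a), so pyGetD is exact

def maxDiff4 (a : List Int) : Int :=
  let a := reverseElms a
  let vmin := PySem.List.pyGetD a 0 0   -- a[0]: IndexError on [], excluded by Pre_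
  let st := (PySem.List.pyRange 0 (PySem.List.len a)).foldl
    (fun (st : Int × Int) i =>
      let x := PySem.List.pyGetD a i 0
      if x < st.1 then (x, st.2)
      else if x - st.1 > st.2 then (st.1, x - st.1)
      else st) (vmin, 0)
  if st.2 = 0 then -1 else st.2

-- ===== PORT B =====
def maxDiff4_alt (a : List Int) : Int :=
  let run := PySem.List.pyGetD a 0 0    -- a[0]: IndexError on [], excluded by Pre_
  let tail := PySem.List.slice a (some 1) none
  let pm := (tail.foldl
    (fun (st : List Int × Int) x =>
      (st.1 ++ [st.2], if x > st.2 then x else st.2)) ([], run)).1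
  let best := (pm.zip tail).foldl
    (fun b px => if px.1 - px.2 > b then px.1 - px.2 else b) 0
  if best = 0 then -1 else best

-- ===== PRECONDITION & SPEC =====
-- Both A and B raise IndexError on the empty list (a[0]); Pre_ excludes only that.
def Pre_maxDiff4 (a : List Int) : Prop := a ≠ []
instance (a : List Int) : Decidable (Pre_maxDiff4 a) := by unfold Pre_maxDiff4; infer_instance
def pvWitness_maxDiff4 : List Int := [2, 7, 1]

def Spec_maxDiff4 (a : List Int) (out : Int) : Prop := out = maxDiff4_alt a
instance (a : List Int) (out : Int) : Decidable (Spec_maxDiff4 a out) := by unfold Spec_maxDiff4; infer_instance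

-- ===== CLAIM (what is proved, stated in full; the proofs are below) =====
def Claim_equal_maxDiff4 : Prop := ∀ (a : List Int), Dom_maxDiff4 a → Pre_maxDiff4 a → Spec_maxDiff4 a (maxDiff4 a)

-- ===== LEMMAS AND PROOFS =====

-- max over pairs j < i of a[j] - a[i], floored at 0: the common value both loops compute
def pqMax : List Int → Int
  | [] => 0
  | x :: xs => max (xs.foldl (fun b y => max b (x - y)) 0) (pqMax xs)

-- B's quantity: seed v = first element, xs = rest; max over i of prefixMax - xs[i], floored at 0
def rMax (v : Int) : List Int → Int
  | [] => 0
  | x :: xs => max (max 0 (v - x)) (rMax (max v x) xs)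

-- A's quantity on the reversed list: running minimum instead of running maximum
def qMax (w : Int) : List Int → Int
  | [] => 0
  | x :: xs => max (max 0 (x - w)) (qMax (min w x) xs)

-- prefix-maximum table B builds
def pmList (v : Int) : List Int → List Int
  | [] => []
  | x :: xs => v :: pmList (max v x) xs

theorem foldl_max_acc (f : Int → Int) (xs : List Int) :
    ∀ b c, xs.foldl (fun b y => max b (f y)) (max b c) = max b (xs.foldl (fun b y => max b (f y)) c) := by
  induction xs with
  | nil => intro b c; simp
  | cons x xs ih =>
    intro b c
    simp only [List.foldl_cons]
    rw [show max (max b c) (f x) = max b (max c (f x)) by omega, ih]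

theorem foldl_max_sup (f g : Int → Int) (xs : List Int) :
    ∀ b c, xs.foldl (fun b y => max b (max (f y) (g y))) (max b c)
      = max (xs.foldl (fun b y => max b (f y)) b) (xs.foldl (fun b y => max b (g y)) c) := by
  induction xs with
  | nil => intro b c; simp
  | cons x xs ih =>
    intro b c
    simp only [List.foldl_cons]
    rw [show max (max b c) (max (f x) (g x)) = max (max b (f x)) (max c (g x)) by omega, ih]

theorem foldl_max_reverse (f : Int → Int) (xs : List Int) :
    ∀ b, xs.reverse.foldl (fun b y => max b (f y)) b = xs.foldl (fun b y => max b (f y)) b := by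
  induction xs with
  | nil => intro b; simp
  | cons x xs ih =>
    intro b
    simp only [List.reverse_cons, List.foldl_append, List.foldl_cons, List.foldl_nil, ih,
      List.foldl_cons]
    rw [show max b (f x) = max (f x) b by omega, foldl_max_acc]
    omega

theorem le_foldl_maxf (f : Int → Int) (xs : List Int) :
    ∀ b, b ≤ xs.foldl (fun b y => max b (f y)) b := by
  induction xs with
  | nil => intro b; simp
  | cons x xs ih =>
    intro b
    simp only [List.foldl_cons]
    exact le_trans (le_max_left b (f x)) (ih (max b (f x)))

theorem pqMax_append_singleton (x : Int) (l : List Int) :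
    pqMax (l ++ [x]) = max (pqMax l) (l.foldl (fun b y => max b (y - x)) 0) := by
  induction l with
  | nil => simp [pqMax]
  | cons z l ih =>
    simp only [List.cons_append, pqMax, ih, List.foldl_cons, List.foldl_append, List.foldl_nil]
    rw [show max (0 : Int) (z - x) = max (z - x) 0 by omega, foldl_max_acc]
    omega

theorem rMax_eq_pqMax (xs : List Int) : ∀ v, rMax v xs = pqMax (v :: xs) := by
  induction xs with
  | nil => intro v; simp [rMax, pqMax]
  | cons x xs ih =>
    intro v
    simp only [rMax, ih, pqMax, List.foldl_cons]
    rw [show max (0 : Int) (v - x) = max (v - x) 0 by omega, foldl_max_acc]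
    have h : xs.foldl (fun b y => max b (max v x - y)) 0
        = max (xs.foldl (fun b y => max b (v - y)) 0) (xs.foldl (fun b y => max b (x - y)) 0) := by
      have := foldl_max_sup (fun y => v - y) (fun y => x - y) xs 0 0
      simp only [max_self] at this
      rw [← this]
      congr 1
      funext b y
      congr 1
      omega
    rw [h]
    have hA := le_foldl_maxf (fun y => v - y) xs 0
    omega

theorem qMax_eq_rMax_neg (xs : List Int) : ∀ w, qMax w xs = rMax (-w) (xs.map Neg.neg) := by
  induction xs with
  | nil => intro w; simp [qMax, rMax]
  | cons x xs ih =>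
    intro w
    simp only [qMax, List.map_cons, rMax, ih]
    rw [show -w - -x = x - w by ring, show max (-w) (-x) = -(min w x) by omega]

theorem pqMax_reverse (m : List Int) : pqMax m.reverse = pqMax (m.map Neg.neg) := by
  induction m with
  | nil => simp
  | cons x xs ih =>
    simp only [List.reverse_cons, pqMax_append_singleton, ih, List.map_cons, pqMax]
    rw [foldl_max_reverse]
    have h : xs.foldl (fun b y => max b (y - x)) 0
        = (xs.map Neg.neg).foldl (fun b y => max b (-x - y)) 0 := by
      rw [List.foldl_map]
      congr 1
      funext b y
      congr 1
      omega
    rw [h]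
    omega

-- A's loop body, named
def aStep (st : Int × Int) (x : Int) : Int × Int :=
  if x < st.1 then (x, st.2)
  else if x - st.1 > st.2 then (st.1, x - st.1)
  else st

theorem aFold_eq (xs : List Int) : ∀ v d, 0 ≤ d →
    xs.foldl aStep (v, d) = (xs.foldl min v, max d (qMax v xs)) := by
  induction xs with
  | nil => intro v d _; simp [qMax]; omega
  | cons x xs ih =>
    intro v d hd
    simp only [List.foldl_cons]
    have hstep : aStep (v, d) x = (min v x, max d (max 0 (x - v))) := by
      simp only [aStep]
      split_ifs <;> simp_all <;> omega
    rw [hstep, ih _ _ (by omega), qMax]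
    simp only [Prod.mk.injEq, true_and]
    omega

theorem bPm_eq (xs : List Int) : ∀ acc v,
    xs.foldl (fun (st : List Int × Int) x => (st.1 ++ [st.2], if x > st.2 then x else st.2)) (acc, v)
      = (acc ++ pmList v xs, xs.foldl max v) := by
  induction xs with
  | nil => intro acc v; simp [pmList]
  | cons x xs ih =>
    intro acc v
    simp only [List.foldl_cons, ih, pmList]
    rw [show (if x > v then x else v) = max v x by omega]
    simp

theorem bZip_eq (xs : List Int) : ∀ v b, 0 ≤ b →
    ((pmList v xs).zip xs).foldl (fun b (px : Int × Int) => if px.1 - px.2 > b then px.1 - px.2 else b) b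
      = max b (rMax v xs) := by
  induction xs with
  | nil => intro v b hb; simp [pmList, rMax]; omega
  | cons x xs ih =>
    intro v b hb
    simp only [pmList, List.zip_cons_cons, List.foldl_cons]
    rw [show (if v - x > b then v - x else b) = max b (max 0 (v - x)) by omega,
      ih _ _ (by omega), rMax]
    omega

theorem reverseElms_eq_reverse (a : List Int) : reverseElms a = a.reverse := by
  unfold reverseElms
  rw [PySem.List.foldl_append_singleton_eq_map, List.nil_append, PySem.List.len_eq,
    PySem.List.pyRange_zero_natCast, List.map_map]
  apply List.ext_getElem
  · simp
  · intro k hk hk'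
    simp only [List.getElem_map, List.getElem_range, Function.comp_apply, List.getElem_reverse]
    simp only [List.length_map, List.length_range] at hk
    rw [show (a.length : Int) - 1 - (k : Int) = ((a.length - 1 - k : Nat) : Int) by omega,
      PySem.List.pyGetD_natCast]
    rw [List.getD_eq_getElem?_getD, List.getElem?_eq_getElem (by omega)]
    simp

-- both returned quantities equal max 0 (pqMax a)
theorem maxDiff4_eq_pq (a0 : Int) (atail : List Int) :
    maxDiff4 (a0 :: atail) = (if max 0 (pqMax (a0 :: atail)) = 0 then -1 else max 0 (pqMax (a0 :: atail))) := by
  unfold maxDiff4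
  rw [reverseElms_eq_reverse]
  have hne : (a0 :: atail).reverse ≠ [] := by simp
  obtain ⟨r0, rtail, hr⟩ := List.exists_cons_of_ne_nil hne
  rw [hr]
  simp only [PySem.List.pyGetD_zero_cons]
  have hfold := PySem.List.foldl_pyRange_zero_pyGetD (r0 :: rtail) 0 aStep (r0, 0)
  simp only [aStep] at hfold
  rw [hfold, aFold_eq _ _ _ (le_refl 0)]
  have hq : max 0 (qMax r0 (r0 :: rtail)) = max 0 (qMax r0 rtail) := by
    simp only [qMax, min_self]
    omega
  have hchain : max 0 (qMax r0 (r0 :: rtail)) = max 0 (pqMax (a0 :: atail)) := by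
    rw [hq, qMax_eq_rMax_neg, rMax_eq_pqMax,
      show (-r0 :: rtail.map Neg.neg) = ((a0 :: atail).reverse).map Neg.neg by rw [hr]; simp,
      List.map_reverse, pqMax_reverse, List.map_map]
    simp
  dsimp only
  rw [hchain]

theorem maxDiff4_alt_eq_pq (a0 : Int) (atail : List Int) :
    maxDiff4_alt (a0 :: atail) = (if max 0 (pqMax (a0 :: atail)) = 0 then -1 else max 0 (pqMax (a0 :: atail))) := by
  unfold maxDiff4_alt
  simp only [PySem.List.pyGetD_zero_cons, PySem.List.slice_from_one, List.tail_cons]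
  rw [bPm_eq, List.nil_append, bZip_eq _ _ _ (le_refl 0), rMax_eq_pqMax]

-- ===== VERDICT (by name: the statement is the Claim_ definition above) =====
theorem maxDiff4_spec : Claim_equal_maxDiff4 := by
  intro a _ hpre
  unfold Spec_maxDiff4
  obtain ⟨a0, atail, rfl⟩ := List.exists_cons_of_ne_nil hpre
  rw [maxDiff4_eq_pq, maxDiff4_alt_eq_pq]
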